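-- pv_equiv track=rewrite | github.com/lzbhaha123/SubnetCalculator | SubnetCalculator/sc_support.py | bin_nega_one
-- ===== SOURCE A (Python) =====
-- def bin_nega_one(str_bin):
--     bigger_bin = ''
--     for i in range(len(str_bin)):
--         if i == len(str_bin)-1:
--             bigger_bin += '0'
--         else:
--             bigger_bin += str_bin[i-1]
--     return  bigger_bin
-- ===== SOURCE B (Python) =====
-- def bin_nega_one(str_bin):
--     if not str_bin:
--         return ''
--     rotated = str_bin[-1:] + str_bin[:-1]
--     return rotated[:-1] + '0'
-- ===== Notes on version B (the rewrite author's own statement) =====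
-- stated objective: simpler
-- what changed: Replaced the per-index loop of single-character appends with a closed-form slice expression: rotate the string right by one and overwrite the final character with a zero character.
import Mathlib
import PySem

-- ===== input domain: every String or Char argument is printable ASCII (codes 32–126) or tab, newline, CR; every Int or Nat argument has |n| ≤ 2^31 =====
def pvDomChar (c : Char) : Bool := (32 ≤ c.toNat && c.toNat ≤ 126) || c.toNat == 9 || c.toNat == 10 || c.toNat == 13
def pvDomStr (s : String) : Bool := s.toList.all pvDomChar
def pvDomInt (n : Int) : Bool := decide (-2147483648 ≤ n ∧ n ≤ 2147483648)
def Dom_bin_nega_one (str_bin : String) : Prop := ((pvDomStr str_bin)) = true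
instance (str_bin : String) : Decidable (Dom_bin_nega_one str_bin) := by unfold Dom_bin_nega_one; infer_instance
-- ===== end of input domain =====

-- B replaces A's per-index loop by a closed-form slice expression (rotate the string right
-- by one, then overwrite its last character with '0'); objective: simpler.

-- ===== PORT A =====
-- literal port of A's index loop; str_bin[i-1] is PySem.List.pyGetD on the char list:
-- inside the loop the index i-1 ranges over -1 .. len-2, always in range, so the default is never read
def bin_nega_one (str_bin : String) : String :=
  let l := str_bin.toList
  let n : Int := (l.length : Int)
  String.ofList <|
    (PySem.List.pyRange 0 n 1).foldl
      (fun acc i =>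
        if i = n - 1 then acc ++ ['0']
        else acc ++ [PySem.List.pyGetD l (i - 1) ' ']) []

-- ===== PORT B =====
-- port of Source B: guard the empty string, rotate right by one with slices, replace the last char
def bin_nega_one_alt (str_bin : String) : String :=
  let l := str_bin.toList
  if l.isEmpty then "" else
    let rotated := PySem.List.slice l (some (-1)) none ++ PySem.List.slice l none (some (-1))
    String.ofList (PySem.List.slice rotated none (some (-1)) ++ ['0'])

-- ===== PRECONDITION & SPEC =====
def Spec_bin_nega_one (str_bin : String) (out : String) : Prop := out = bin_nega_one_alt str_bin
instance (str_bin : String) (out : String) : Decidable (Spec_bin_nega_one str_bin out) := by unfold Spec_bin_nega_one; infer_instance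

-- ===== CLAIM (what is proved, stated in full; the proofs are below) =====
def Claim_equal_bin_nega_one : Prop := ∀ (str_bin : String), Dom_bin_nega_one str_bin → Spec_bin_nega_one str_bin (bin_nega_one str_bin)

-- ===== LEMMAS AND PROOFS =====

-- A's loop over indices 1..j-1 (after the first iteration) reads chars 0..j-1, i.e. l.take j
lemma map_range_pyGetD (l : List Char) :
    ∀ j : Nat, j ≤ l.length →
      (List.range j).map (fun k : Nat => PySem.List.pyGetD l (k : Int) ' ') = l.take j := by
  intro j
  induction j with
  | zero => simp
  | succ j ih =>
    intro h
    have hj : j < l.length := by omega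
    rw [List.range_succ, List.map_append, ih (by omega), List.take_add_one]
    simp [PySem.List.pyGetD_natCast, List.getD_eq_getElem?_getD, List.getElem?_eq_getElem hj]

-- the heart of the equivalence, on the character list
lemma bin_nega_one_core (l : List Char) :
    String.ofList
      ((PySem.List.pyRange 0 (l.length : Int) 1).foldl
        (fun acc i =>
          if i = (l.length : Int) - 1 then acc ++ ['0']
          else acc ++ [PySem.List.pyGetD l (i - 1) ' ']) [])
    = if l.isEmpty then "" else
        String.ofList (PySem.List.slice
          (PySem.List.slice l (some (-1)) none ++ PySem.List.slice l none (some (-1)))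
          none (some (-1)) ++ ['0']) := by
  by_cases hnil : l = []
  · subst hnil
    simp
  · have hpos : 1 ≤ l.length := List.length_pos_iff.mpr hnil
    rw [if_neg (by simpa using hnil)]
    have hbody : (fun (acc : List Char) i =>
          if i = (l.length : Int) - 1 then acc ++ ['0']
          else acc ++ [PySem.List.pyGetD l (i - 1) ' '])
        = fun acc i => acc ++ [if i = (l.length : Int) - 1 then '0'
            else PySem.List.pyGetD l (i - 1) ' '] := by
      funext acc i; split <;> rfl
    rw [hbody, PySem.List.foldl_append_singleton_eq_map, List.nil_append]
    rw [PySem.List.slice_from_neg_one, PySem.List.slice_to_neg_one, PySem.List.slice_to_neg_one]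
    have hsplit : PySem.List.pyRange 0 (l.length : Int) 1
        = PySem.List.pyRange 0 ((l.length : Int) - 1) 1 ++ [(l.length : Int) - 1] := by
      have := PySem.List.pyRange_one_succ_right (a := 0) (b := (l.length : Int) - 1) (by omega)
      rw [sub_add_cancel] at this
      simpa using this
    rw [hsplit, List.map_append]
    have hmapcongr :
        (PySem.List.pyRange 0 ((l.length : Int) - 1) 1).map
          (fun i => if i = (l.length : Int) - 1 then '0' else PySem.List.pyGetD l (i - 1) ' ')
        = (PySem.List.pyRange 0 ((l.length : Int) - 1) 1).map
          (fun i => PySem.List.pyGetD l (i - 1) ' ') := by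
      apply List.map_congr_left
      intro i hi
      rw [PySem.List.mem_pyRange_one] at hi
      simp [show i ≠ (l.length : Int) - 1 by omega]
    rw [hmapcongr]
    simp only [List.map_cons, List.map_nil]
    by_cases h1 : l.length = 1
    · obtain ⟨a, ha⟩ := List.length_eq_one_iff.mp h1
      subst ha
      simp [PySem.List.pyRange_one_eq_nil]
    · have h2 : 2 ≤ l.length := by omega
      have hcons : PySem.List.pyRange 0 ((l.length : Int) - 1) 1
          = 0 :: PySem.List.pyRange 1 ((l.length : Int) - 1) 1 :=
        PySem.List.pyRange_one_cons (by omega)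
      rw [hcons, List.map_cons]
      have hlast : PySem.List.pyGetD l ((0:Int) - 1) ' ' = l.getLast hnil := by
        simpa using PySem.List.pyGetD_neg_one l ' ' hnil
      have htail : (PySem.List.pyRange 1 ((l.length : Int) - 1) 1).map
            (fun i => PySem.List.pyGetD l (i - 1) ' ') = l.take (l.length - 2) := by
        rw [PySem.List.pyRange_one, List.map_map]
        have he : ((l.length : Int) - 1 - 1).toNat = l.length - 2 := by omega
        rw [he]
        calc (List.range (l.length - 2)).map
              ((fun i => PySem.List.pyGetD l (i - 1) ' ') ∘ fun k : Nat => 1 + (k : Int))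
            = (List.range (l.length - 2)).map
              (fun k : Nat => PySem.List.pyGetD l (k : Int) ' ') := by
              apply List.map_congr_left; intro k _
              simp [Function.comp]
          _ = l.take (l.length - 2) := map_range_pyGetD l _ (by omega)
      rw [hlast, htail]
      have hdrop : l.drop (l.length - 1) = [l.getLast hnil] := by
        rw [List.drop_eq_getElem_cons (by omega)]
        have hsum : l.length - 1 + 1 = l.length := by omega
        rw [hsum, List.drop_length, List.getLast_eq_getElem]
      have hddl : (l.drop (l.length - 1) ++ l.dropLast).dropLast
          = l.drop (l.length - 1) ++ l.dropLast.dropLast := by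
        apply List.dropLast_append_of_ne_nil
        apply List.ne_nil_of_length_pos
        rw [List.length_dropLast]
        omega
      rw [hddl, hdrop]
      have hdd : l.dropLast.dropLast = l.take (l.length - 2) := by
        simp [List.dropLast_eq_take, List.take_take]
        omega
      rw [hdd]
      simp

-- ===== VERDICT (by name: the statement is the Claim_ definition above) =====
theorem bin_nega_one_spec : Claim_equal_bin_nega_one := by
  intro s _
  show bin_nega_one s = bin_nega_one_alt s
  exact bin_nega_one_core s.toList
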